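-- pv_equiv track=rewrite | github.com/gblack686-revstar/software-delivery-adw | adws/adw_scoping_modular.py | get_all_prerequisites
-- ===== SOURCE A (Python) =====
-- from typing import Optional, List, Dict, Set, Tuple
--
-- FILE_DEPENDENCIES = {
--     2: [1],           # Requirements needs discovery brief
--     3: [2],           # User flows needs requirements
--     4: [3],           # Data models needs user flows
--     5: [4],           # ERD needs data models
--     6: [5],           # ML research needs ERD
--     11: [5],          # Security needs ERD (can run parallel with 6!)
--     7: [6, 11],       # AWS analysis needs ML research + Security
--     8: [7],           # AWS services needs AWS analysis
--     9: [8],           # Architecture needs services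
--     10: [9],          # CDK needs architecture (can run parallel with 12,13,14!)
--     12: [9],          # Cost needs architecture
--     13: [9],          # Validation needs architecture
--     14: [9],          # LLM prompts needs architecture
-- }
--
-- def get_all_prerequisites(file_num: int) -> Set[int]:
--     """Get all prerequisite file numbers (transitive closure).
--
--     Args:
--         file_num: Target file number
--
--     Returns:
--         Set of all prerequisite file numbers
--     """
--     prerequisites = set()
--     to_process = [file_num]
--
--     while to_process:
--         current = to_process.pop()
--         deps = FILE_DEPENDENCIES.get(current, [])
--         for dep in deps:
--             if dep not in prerequisites:
--                 prerequisites.add(dep)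
--                 to_process.append(dep)
--
--     return prerequisites
-- ===== SOURCE B (Python) =====
-- FILE_DEPENDENCIES = {
--     2: [1],
--     3: [2],
--     4: [3],
--     5: [4],
--     6: [5],
--     11: [5],
--     7: [6, 11],
--     8: [7],
--     9: [8],
--     10: [9],
--     12: [9],
--     13: [9],
--     14: [9],
-- }
--
-- def get_all_prerequisites(file_num: int):
--     """Transitive closure of prerequisites by naive fixpoint iteration:
--     repeatedly sweep the whole dependency table, adding the deps of every
--     node already known to be needed, until a full sweep changes nothing."""
--     prerequisites = set()
--     changed = True
--     while changed:
--         changed = False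
--         for node, deps in FILE_DEPENDENCIES.items():
--             if node == file_num or node in prerequisites:
--                 for dep in deps:
--                     if dep not in prerequisites:
--                         prerequisites.add(dep)
--                         changed = True
--     return prerequisites
-- ===== Notes on version B (the rewrite author's own statement) =====
-- stated objective: alternative
-- what changed: Replaced A's worklist stack (pop a node, push its newly-seen deps) by a naive fixpoint: repeated full sweeps over the FILE_DEPENDENCIES table adding deps of every already-needed node until a sweep makes no change, with no stack at all.
import Mathlib
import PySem

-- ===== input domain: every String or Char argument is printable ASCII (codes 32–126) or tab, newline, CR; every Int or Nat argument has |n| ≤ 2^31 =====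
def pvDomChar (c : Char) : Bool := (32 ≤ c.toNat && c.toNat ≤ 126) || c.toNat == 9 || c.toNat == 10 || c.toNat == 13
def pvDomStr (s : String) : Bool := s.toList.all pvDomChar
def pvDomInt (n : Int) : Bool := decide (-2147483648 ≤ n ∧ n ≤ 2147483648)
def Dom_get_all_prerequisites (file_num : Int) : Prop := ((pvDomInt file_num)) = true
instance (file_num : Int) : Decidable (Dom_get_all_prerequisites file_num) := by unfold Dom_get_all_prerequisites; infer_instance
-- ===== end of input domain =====

-- B replaces A's worklist stack by naive fixpoint sweeps over the dependency table (alternative decomposition; both Pythons return a set).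

-- ===== PORT A =====
-- module constant FILE_DEPENDENCIES as A uses it (a dict looked up with .get)
def fileDeps : PySem.Dict Int (List Int) :=
  PySem.Dict.ofList [(2,[1]),(3,[2]),(4,[3]),(5,[4]),(6,[5]),(11,[5]),(7,[6,11]),(8,[7]),(9,[8]),(10,[9]),(12,[9]),(13,[9]),(14,[9])]

-- A's while loop: state = (prerequisites, to_process); current = to_process.pop() (last element).
-- fuel only makes the recursion total; 100 is never exhausted on this fixed finite graph.
def aLoop : Nat → PySem.Set Int → List Int → PySem.Set Int
  | 0, pre, _ => pre
  | fuel+1, pre, stack =>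
    match PySem.List.pop? stack (-1) with
    | none => pre  -- to_process empty: while ends
    | some (current, rest) =>
      let deps := fileDeps.getD current []
      let st := deps.foldl (fun (st : PySem.Set Int × List Int) dep =>
        if PySem.Set.contains st.1 dep then st
        else (PySem.Set.add st.1 dep, st.2 ++ [dep])) (pre, rest)
      aLoop fuel st.1 st.2

def get_all_prerequisites (file_num : Int) : List Int :=
  aLoop 100 PySem.Set.empty [file_num]

-- ===== PORT B =====
-- FILE_DEPENDENCIES.items(), as B iterates it
def depItems : List (Int × List Int) :=
  [(2,[1]),(3,[2]),(4,[3]),(5,[4]),(6,[5]),(11,[5]),(7,[6,11]),(8,[7]),(9,[8]),(10,[9]),(12,[9]),(13,[9]),(14,[9])]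

-- one full sweep of the table: returns the grown set and the 'changed' flag
def bSweep (file_num : Int) (pre : PySem.Set Int) : PySem.Set Int × Bool :=
  depItems.foldl (fun acc kv =>
    if kv.1 == file_num || PySem.Set.contains acc.1 kv.1 then
      kv.2.foldl (fun acc2 dep =>
        if PySem.Set.contains acc2.1 dep then acc2
        else (PySem.Set.add acc2.1 dep, true)) acc
    else acc) (pre, false)

-- 'while changed': sweep, repeat while the sweep reported a change (fuel for totality; never exhausted)
def bFix : Nat → Int → PySem.Set Int → PySem.Set Int
  | 0, _, pre => pre
  | fuel+1, file_num, pre =>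
    let res := bSweep file_num pre
    if res.2 then bFix fuel file_num res.1 else res.1

def get_all_prerequisites_alt (file_num : Int) : List Int :=
  bFix 100 file_num PySem.Set.empty

-- ===== PRECONDITION & SPEC =====
def Spec_get_all_prerequisites (file_num : Int) (out : List Int) : Prop := out = get_all_prerequisites_alt file_num
instance (file_num : Int) (out : List Int) : Decidable (Spec_get_all_prerequisites file_num out) := by unfold Spec_get_all_prerequisites; infer_instance

-- ===== CLAIM =====
def Claim_equal_get_all_prerequisites : Prop := ∀ (file_num : Int), Dom_get_all_prerequisites file_num → Spec_get_all_prerequisites file_num (get_all_prerequisites file_num)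

-- ===== LEMMAS AND PROOFS =====
-- a non-key of the table looks up to the empty dependency list (A's .get default)
lemma fileDeps_getD_of_out (n : Int) (h1 : ¬ (2 ≤ n ∧ n ≤ 14)) : fileDeps.getD n [] = [] := by
  have hit : fileDeps.items = depItems := by decide
  have hne : ∀ k : Int, 2 ≤ k → k ≤ 14 → (k == n) = false := by
    intro k hk1 hk2; rw [beq_eq_false_iff_ne]; omega
  simp [PySem.Dict.getD, PySem.Dict.get?, hit, depItems, List.find?,
        hne 2 (by omega) (by omega), hne 3 (by omega) (by omega), hne 4 (by omega) (by omega),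
        hne 5 (by omega) (by omega), hne 6 (by omega) (by omega), hne 7 (by omega) (by omega),
        hne 8 (by omega) (by omega), hne 9 (by omega) (by omega), hne 10 (by omega) (by omega),
        hne 11 (by omega) (by omega), hne 12 (by omega) (by omega), hne 13 (by omega) (by omega),
        hne 14 (by omega) (by omega)]

-- for a file_num outside the table, B's first sweep changes nothing
lemma bSweep_of_out (n : Int) (h1 : ¬ (2 ≤ n ∧ n ≤ 14)) :
    bSweep n PySem.Set.empty = (PySem.Set.empty, false) := by
  have hne : ∀ k : Int, 2 ≤ k → k ≤ 14 → (k = n) = False := by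
    intro k hk1 hk2; exact eq_false (by omega)
  simp [bSweep, depItems, PySem.Set.contains, PySem.Set.empty,
        hne 2 (by omega) (by omega), hne 3 (by omega) (by omega), hne 4 (by omega) (by omega),
        hne 5 (by omega) (by omega), hne 6 (by omega) (by omega), hne 7 (by omega) (by omega),
        hne 8 (by omega) (by omega), hne 9 (by omega) (by omega), hne 10 (by omega) (by omega),
        hne 11 (by omega) (by omega), hne 12 (by omega) (by omega), hne 13 (by omega) (by omega),
        hne 14 (by omega) (by omega)]

-- ===== VERDICT =====
theorem get_all_prerequisites_spec : Claim_equal_get_all_prerequisites := by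
  intro n _
  unfold Spec_get_all_prerequisites
  by_cases h : 2 ≤ n ∧ n ≤ 14
  · obtain ⟨h1, h2⟩ := h
    interval_cases n <;> decide
  · have hd := fileDeps_getD_of_out n h
    have hs := bSweep_of_out n h
    have h1 : PySem.List.pop? [n] (-1) = some (n, []) := by
      simp [PySem.List.pop?, PySem.List.pyIdx?]
    have hA : aLoop 100 PySem.Set.empty [n] = [] := by
      show aLoop (99+1) _ _ = _
      rw [aLoop, h1]
      simp [hd, aLoop, PySem.List.pop?, PySem.List.pyIdx?, PySem.Set.empty]
    have hB : bFix 100 n PySem.Set.empty = [] := by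
      show bFix (99+1) _ _ = _
      rw [bFix, hs]
      simp [PySem.Set.empty]
    rw [get_all_prerequisites, get_all_prerequisites_alt, hA, hB]
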